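-- pv_equiv track=rewrite | github.com/aabda2000/simulation | 1_Simulation_repartition_equitable.py | affichageCases
-- ===== SOURCE A (Python) =====
-- def affichageCases(Matrice):
--     # nombre d'abscisses
--     M = len(Matrice[0])
--     # nombre d'ordonnées
--     N = len(Matrice)
--     Xverts = []
--     Yverts = []
--     Xrouges = []
--     Yrouges = []
--     Xnoirs = []
--     Ynoirs = []
--     Xbleus = []
--     Ybleus = []
--     Xmages = []
--     Ymages = []
--     # balayage de la matrice
--     for i in range(N):
--         for k in range(M):
--             # cas des points verts
--             if Matrice[i][k] == 0:
--                 # on retient l'abscisse correspondante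
--                 Xverts.append(longueur*k)
--                 # on retient l'ordonnee correspondante
--                 Yverts.append(longueur*i)
--             # cas des points rouges
--             elif Matrice[i][k] == 1:
--                 # on retient l'abscisse correspondante
--                 Xrouges.append(longueur*k)
--                 # on retient l'ordonnee correspondante
--                 Yrouges.append(longueur*i)
--
--             # cas des points noirs
--             elif Matrice[i][k] == 2:
--                 # on retient l'abscisse correspondante
--                 Xnoirs.append(longueur*k)
--                 # on retient l'ordonnee correspondante
--                 Ynoirs.append(longueur*i)
--             elif Matrice[i][k] == 3:
--                 # on retient l'abscisse correspondante
--                 Xbleus.append(longueur*k)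
--                 # on retient l'ordonnee correspondante
--                 Ybleus.append(longueur*i)
--
--             elif Matrice[i][k] == 4:
--                 # on retient l'abscisse correspondante
--                 Xmages.append(longueur*k)
--                 # on retient l'ordonnee correspondante
--                 Ymages.append(longueur*i)
--
--     return Xverts, Yverts, Xrouges, Yrouges, Xnoirs, Ynoirs, Xbleus, Ybleus, Xmages, Ymages
--
-- longueur = 10
-- ===== SOURCE B (Python) =====
-- longueur = 10
--
-- def affichageCases(Matrice):
--     # One flattened pass builds the (row, col, value) cell list; each output
--     # list is then a per-color filter-comprehension over it.
--     M = len(Matrice[0])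
--     cells = [(i, k, Matrice[i][k]) for i in range(len(Matrice)) for k in range(M)]
--
--     def xs(c):
--         return [longueur * k for (i, k, v) in cells if v == c]
--
--     def ys(c):
--         return [longueur * i for (i, k, v) in cells if v == c]
--
--     return (xs(0), ys(0), xs(1), ys(1), xs(2), ys(2),
--             xs(3), ys(3), xs(4), ys(4))
-- ===== Notes on version B (the rewrite author's own statement) =====
-- stated objective: alternative
-- what changed: Replaces A's single-pass 5-way if/elif accumulation into ten mutable lists by building a flattened (row, col, value) cell list once and producing each of the ten outputs as an independent per-color filter comprehension.
import Mathlib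
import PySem

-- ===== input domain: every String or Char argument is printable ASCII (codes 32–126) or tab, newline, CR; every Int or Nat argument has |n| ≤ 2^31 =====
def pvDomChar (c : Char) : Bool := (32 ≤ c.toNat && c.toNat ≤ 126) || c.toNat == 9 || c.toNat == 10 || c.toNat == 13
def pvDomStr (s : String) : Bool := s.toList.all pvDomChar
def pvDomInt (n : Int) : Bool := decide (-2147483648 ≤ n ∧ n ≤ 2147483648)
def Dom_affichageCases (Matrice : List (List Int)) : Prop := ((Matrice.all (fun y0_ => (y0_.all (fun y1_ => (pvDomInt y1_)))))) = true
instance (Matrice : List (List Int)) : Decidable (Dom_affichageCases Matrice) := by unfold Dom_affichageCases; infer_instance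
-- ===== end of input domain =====

-- B builds the flattened (row, col, value) cell list once and produces each of the ten
-- outputs as an independent per-color filter, instead of A's single pass with a 5-way
-- if/elif chain appending into ten accumulators (objective: alternative; same cost).

def longueur : Int := 10

-- ===== PORT A =====
-- loop body of A, factored out: the if/elif chain over the cell (i, k, value)
def pvStepA (s : List Int × List Int × List Int × List Int × List Int × List Int × List Int × List Int × List Int × List Int)
    (c : Int × Int × Int) : List Int × List Int × List Int × List Int × List Int × List Int × List Int × List Int × List Int × List Int :=
  match s, c with
  | (xv, yv, xr, yr, xn, yn, xb, yb, xm, ym), (i, k, v) =>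
    if v == 0 then (xv ++ [longueur * k], yv ++ [longueur * i], xr, yr, xn, yn, xb, yb, xm, ym)
    else if v == 1 then (xv, yv, xr ++ [longueur * k], yr ++ [longueur * i], xn, yn, xb, yb, xm, ym)
    else if v == 2 then (xv, yv, xr, yr, xn ++ [longueur * k], yn ++ [longueur * i], xb, yb, xm, ym)
    else if v == 3 then (xv, yv, xr, yr, xn, yn, xb ++ [longueur * k], yb ++ [longueur * i], xm, ym)
    else if v == 4 then (xv, yv, xr, yr, xn, yn, xb, yb, xm ++ [longueur * k], ym ++ [longueur * i])
    else (xv, yv, xr, yr, xn, yn, xb, yb, xm, ym)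

def affichageCases (Matrice : List (List Int)) : List Int × List Int × List Int × List Int × List Int × List Int × List Int × List Int × List Int × List Int :=
  let M : Int := (PySem.List.pyGetD Matrice 0 ([] : List Int)).length
  let N : Int := Matrice.length
  (PySem.List.pyRange 0 N 1).foldl
    (fun s i =>
      (PySem.List.pyRange 0 M 1).foldl
        (fun s k => pvStepA s (i, k, PySem.List.pyGetD (PySem.List.pyGetD Matrice i []) k 0)) s)
    ([], [], [], [], [], [], [], [], [], [])

-- ===== PORT B =====
def pvCells (Matrice : List (List Int)) : List (Int × Int × Int) :=
  let M : Int := (PySem.List.pyGetD Matrice 0 ([] : List Int)).length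
  (PySem.List.pyRange 0 (Matrice.length : Int) 1).flatMap
    (fun i => (PySem.List.pyRange 0 M 1).map
      (fun k => (i, k, PySem.List.pyGetD (PySem.List.pyGetD Matrice i []) k 0)))

def pvXs (cells : List (Int × Int × Int)) (c : Int) : List Int :=
  (cells.filter (fun t => t.2.2 == c)).map (fun t => longueur * t.2.1)

def pvYs (cells : List (Int × Int × Int)) (c : Int) : List Int :=
  (cells.filter (fun t => t.2.2 == c)).map (fun t => longueur * t.1)

def affichageCases_alt (Matrice : List (List Int)) : List Int × List Int × List Int × List Int × List Int × List Int × List Int × List Int × List Int × List Int :=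
  let cells := pvCells Matrice
  (pvXs cells 0, pvYs cells 0, pvXs cells 1, pvYs cells 1, pvXs cells 2, pvYs cells 2,
   pvXs cells 3, pvYs cells 3, pvXs cells 4, pvYs cells 4)

-- ===== PRECONDITION & SPEC =====
-- Pre_ excludes exactly the inputs where Python A raises IndexError: an empty matrix
-- (Matrice[0]) or a row shorter than the first row (Matrice[i][k] with k in range(M)).
def Pre_affichageCases (Matrice : List (List Int)) : Prop :=
  Matrice ≠ [] ∧ ∀ row ∈ Matrice, (Matrice.headD []).length ≤ row.length
instance (Matrice : List (List Int)) : Decidable (Pre_affichageCases Matrice) := by unfold Pre_affichageCases; infer_instance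
def pvWitness_affichageCases : List (List Int) := [[0, 1], [4, 7]]

-- Decidable-equality helpers for the 10-tuple result (instance search does not nest this deep)
def pvDE1 : DecidableEq (List Int) := instDecidableEqList
def pvDE2 : DecidableEq (List Int × List Int) := @instDecidableEqProd _ _ pvDE1 pvDE1
def pvDE3 : DecidableEq (List Int × List Int × List Int) := @instDecidableEqProd _ _ pvDE1 pvDE2
def pvDE4 : DecidableEq (List Int × List Int × List Int × List Int) := @instDecidableEqProd _ _ pvDE1 pvDE3
def pvDE5 : DecidableEq (List Int × List Int × List Int × List Int × List Int) := @instDecidableEqProd _ _ pvDE1 pvDE4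
def pvDE6 : DecidableEq (List Int × List Int × List Int × List Int × List Int × List Int) := @instDecidableEqProd _ _ pvDE1 pvDE5
def pvDE7 : DecidableEq (List Int × List Int × List Int × List Int × List Int × List Int × List Int) := @instDecidableEqProd _ _ pvDE1 pvDE6
def pvDE8 : DecidableEq (List Int × List Int × List Int × List Int × List Int × List Int × List Int × List Int) := @instDecidableEqProd _ _ pvDE1 pvDE7
def pvDE9 : DecidableEq (List Int × List Int × List Int × List Int × List Int × List Int × List Int × List Int × List Int) := @instDecidableEqProd _ _ pvDE1 pvDE8
def pvDE10 : DecidableEq (List Int × List Int × List Int × List Int × List Int × List Int × List Int × List Int × List Int × List Int) := @instDecidableEqProd _ _ pvDE1 pvDE9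

def Spec_affichageCases (Matrice : List (List Int)) (out : List Int × List Int × List Int × List Int × List Int × List Int × List Int × List Int × List Int × List Int) : Prop := out = affichageCases_alt Matrice
instance (Matrice : List (List Int)) (out : List Int × List Int × List Int × List Int × List Int × List Int × List Int × List Int × List Int × List Int) : Decidable (Spec_affichageCases Matrice out) := by unfold Spec_affichageCases; exact pvDE10 _ _

-- ===== CLAIM (what is proved, stated in full; the proofs are below) =====
def Claim_equal_affichageCases : Prop := ∀ (Matrice : List (List Int)), Dom_affichageCases Matrice → Pre_affichageCases Matrice → Spec_affichageCases Matrice (affichageCases Matrice)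

-- ===== LEMMAS AND PROOFS =====

-- folding A's step over any cell list appends the per-color filtered coordinates
theorem pvFoldA_eq (cells : List (Int × Int × Int))
    (s : List Int × List Int × List Int × List Int × List Int × List Int × List Int × List Int × List Int × List Int) :
    cells.foldl pvStepA s =
      (s.1 ++ pvXs cells 0, s.2.1 ++ pvYs cells 0,
       s.2.2.1 ++ pvXs cells 1, s.2.2.2.1 ++ pvYs cells 1,
       s.2.2.2.2.1 ++ pvXs cells 2, s.2.2.2.2.2.1 ++ pvYs cells 2,
       s.2.2.2.2.2.2.1 ++ pvXs cells 3, s.2.2.2.2.2.2.2.1 ++ pvYs cells 3,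
       s.2.2.2.2.2.2.2.2.1 ++ pvXs cells 4, s.2.2.2.2.2.2.2.2.2 ++ pvYs cells 4) := by
  induction cells generalizing s with
  | nil => simp [pvXs, pvYs]
  | cons t ts ih =>
    obtain ⟨i, k, v⟩ := t
    obtain ⟨xv, yv, xr, yr, xn, yn, xb, yb, xm, ym⟩ := s
    by_cases h0 : v = 0
    · simp [pvStepA, h0, ih, pvXs, pvYs, List.append_assoc]
    · by_cases h1 : v = 1
      · simp [pvStepA, h1, ih, pvXs, pvYs, List.append_assoc]
      · by_cases h2 : v = 2
        · simp [pvStepA, h2, ih, pvXs, pvYs, List.append_assoc]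
        · by_cases h3 : v = 3
          · simp [pvStepA, h3, ih, pvXs, pvYs, List.append_assoc]
          · by_cases h4 : v = 4
            · simp [pvStepA, h4, ih, pvXs, pvYs, List.append_assoc]
            · simp [pvStepA, h0, h1, h2, h3, h4, ih, pvXs, pvYs]

-- A's nested range loop is the fold of its step over the flattened cell list
theorem pvA_eq_fold (Matrice : List (List Int)) :
    affichageCases Matrice = (pvCells Matrice).foldl pvStepA ([], [], [], [], [], [], [], [], [], []) := by
  unfold affichageCases pvCells
  rw [List.foldl_flatMap]
  simp [List.foldl_map]

-- ===== VERDICT (by name: the statement is the Claim_ definition above) =====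
theorem affichageCases_spec : Claim_equal_affichageCases := by
  intro Matrice _ _
  unfold Spec_affichageCases affichageCases_alt
  rw [pvA_eq_fold, pvFoldA_eq]
  simp
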